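-- pv_equiv track=rewrite | github.com/lza6/AIWriteX-main | src/ai_write_x/utils/utils.py | extract_markdown_content
-- ===== SOURCE A (Python) =====
-- def extract_markdown_content(content):
--     """从Markdown内容中提取标题和摘要"""
--     lines = content.strip().split("\n")
--     title = None
--     digest = ""
--
--     for line in lines:
--         line = line.strip()
--         if line.startswith("# "):
--             title = line[2:].strip()
--             break
--
--     if title is None:
--         for line in lines:
--             line = line.strip()
--             if line:
--                 title = line
--                 break
--
--     content_lines = []
--     for line in lines:
--         line = line.strip()
--         if line and not line.startswith("#"):
--             content_lines.append(line)
--         if len(content_lines) >= 3: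
--             break
--
--     digest = " ".join(content_lines)[:100] + "..." if content_lines else "无摘要"
--
--     return title, digest
-- ===== SOURCE B (Python) =====
-- def extract_markdown_content(content):
--     """从Markdown内容中提取标题和摘要 — single pass over the lines instead of three scans"""
--     heading = None
--     first_nonempty = None
--     content_lines = []
--     for raw in content.strip().split("\n"):
--         line = raw.strip()
--         if heading is None and line.startswith("# "):
--             heading = line[2:].strip()
--         if first_nonempty is None and line:
--             first_nonempty = line
--         if len(content_lines) < 3 and line and not line.startswith("#"):
--             content_lines.append(line)
--     title = heading if heading is not None else first_nonempty
--     digest = " ".join(content_lines)[:100] + "..." if content_lines else "无摘要"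
--     return title, digest
-- ===== Notes on version B (the rewrite author's own statement) =====
-- stated objective: alternative
-- what changed: A's three sequential scans over the lines (find '# ' heading, find first nonempty line, collect up to three content lines) are fused into one pass maintaining three pieces of state.
-- outside the precondition, e.g. on extract_markdown_content('   '): A returns (None, '无摘要'), B returns (None, '无摘要')
import Mathlib
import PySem

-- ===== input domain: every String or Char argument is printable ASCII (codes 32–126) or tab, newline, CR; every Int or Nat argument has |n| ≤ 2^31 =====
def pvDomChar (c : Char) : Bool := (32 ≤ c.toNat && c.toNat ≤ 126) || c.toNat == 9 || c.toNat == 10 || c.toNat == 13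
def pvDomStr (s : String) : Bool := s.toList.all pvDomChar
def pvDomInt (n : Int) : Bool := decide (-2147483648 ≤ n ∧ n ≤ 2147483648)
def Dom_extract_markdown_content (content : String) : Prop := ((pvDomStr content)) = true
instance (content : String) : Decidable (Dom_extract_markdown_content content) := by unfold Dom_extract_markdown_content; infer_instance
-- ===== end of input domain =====

-- B fuses A's three sequential scans over the lines into one pass with three pieces of state; same return values.


-- ===== PORT A =====
-- first loop: break on the first stripped line starting with "# "
def pvFindTitleA : List (List Char) → Option (List Char)
  | [] => none
  | l :: ls =>
    let line := PySem.Chars.strip l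
    if PySem.Chars.startswith line ['#', ' '] then
      some (PySem.Chars.strip (PySem.Chars.slice line (some 2) none))
    else pvFindTitleA ls

-- second loop: break on the first truthy (nonempty) stripped line
def pvFindFirstA : List (List Char) → Option (List Char)
  | [] => none
  | l :: ls =>
    let line := PySem.Chars.strip l
    if line ≠ [] then some line else pvFindFirstA ls

-- third loop: append truthy non-'#' stripped lines, break once len(content_lines) >= 3
def pvCollectA : List (List Char) → List (List Char) → List (List Char)
  | [], acc => acc
  | l :: ls, acc =>
    let line := PySem.Chars.strip l
    let acc' := if line ≠ [] ∧ ¬ PySem.Chars.startswith line ['#'] then acc ++ [line] else acc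
    if acc'.length ≥ 3 then acc' else pvCollectA ls acc'

def extract_markdown_content (content : String) : String × String :=
  let lines := PySem.Chars.splitOn (PySem.Chars.strip content.toList) ['\n']
  let title : List Char :=
    match pvFindTitleA lines with
    | some t => t
    | none => (pvFindFirstA lines).getD []   -- Python A returns None when no nonempty line; excluded by Pre_
  let contentLines := pvCollectA lines []
  let digest : List Char :=
    if contentLines = [] then "无摘要".toList
    else PySem.Chars.slice (PySem.Chars.join [' '] contentLines) none (some 100) ++ "...".toList
  (String.ofList title, String.ofList digest)

-- ===== PORT B =====
-- one pass, state = (heading, first_nonempty, content_lines)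
def pvScanB : List (List Char) → Option (List Char) → Option (List Char) → List (List Char) →
    Option (List Char) × Option (List Char) × List (List Char)
  | [], h, f, acc => (h, f, acc)
  | l :: ls, h, f, acc =>
    let line := PySem.Chars.strip l
    let h' := if h = none ∧ PySem.Chars.startswith line ['#', ' '] then
        some (PySem.Chars.strip (PySem.Chars.slice line (some 2) none)) else h
    let f' := if f = none ∧ line ≠ [] then some line else f
    let acc' := if acc.length < 3 ∧ line ≠ [] ∧ ¬ PySem.Chars.startswith line ['#'] then acc ++ [line] else acc
    pvScanB ls h' f' acc'

def extract_markdown_content_alt (content : String) : String × String :=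
  let lines := PySem.Chars.splitOn (PySem.Chars.strip content.toList) ['\n']
  let st := pvScanB lines none none []
  let title : List Char := (st.1.or st.2.1).getD []   -- Python B returns None when both are None; excluded by Pre_
  let digest : List Char :=
    if st.2.2 = [] then "无摘要".toList
    else PySem.Chars.slice (PySem.Chars.join [' '] st.2.2) none (some 100) ++ "...".toList
  (String.ofList title, String.ofList digest)

-- ===== PRECONDITION & SPEC =====
-- Pre_ excludes content that strips to the empty string: there both Pythons return None as the title, which is not a String.
def Pre_extract_markdown_content (content : String) : Prop := PySem.Chars.strip content.toList ≠ []
instance (content : String) : Decidable (Pre_extract_markdown_content content) := by unfold Pre_extract_markdown_content; infer_instance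
def pvWitness_extract_markdown_content : String := "# Title\nbody"
def Spec_extract_markdown_content (content : String) (out : String × String) : Prop := out = extract_markdown_content_alt content
instance (content : String) (out : String × String) : Decidable (Spec_extract_markdown_content content out) := by unfold Spec_extract_markdown_content; infer_instance

-- ===== CLAIM (what is proved, stated in full; the proofs are below) =====
def Claim_equal_extract_markdown_content : Prop := ∀ (content : String), Dom_extract_markdown_content content → Pre_extract_markdown_content content → Spec_extract_markdown_content content (extract_markdown_content content)

-- ===== LEMMAS AND PROOFS =====

-- the fused pass computes exactly the results of A's three scans
theorem pvScanB_eq (ls : List (List Char)) : ∀ (h f : Option (List Char)) (acc : List (List Char)),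
    acc.length ≤ 3 →
    pvScanB ls h f acc =
      (h.or (pvFindTitleA ls), f.or (pvFindFirstA ls),
        if acc.length = 3 then acc else pvCollectA ls acc) := by
  induction ls with
  | nil =>
    intro h f acc hacc
    simp [pvScanB, pvFindTitleA, pvFindFirstA, pvCollectA]
  | cons l ls ih =>
    intro h f acc hacc
    simp only [pvScanB, pvFindTitleA, pvFindFirstA, pvCollectA]
    rw [ih _ _ _ (by
      split_ifs with hc
      · have h1 := hc.1; simp only [List.length_append, List.length_singleton]; omega
      · exact hacc)]
    clear ih
    simp only [Prod.mk.injEq]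
    refine ⟨?_, ?_, ?_⟩
    · cases h <;> split_ifs <;> simp_all [Option.or]
    · cases f <;> split_ifs <;> simp_all [Option.or]
    · split_ifs <;> simp_all [List.length_append] <;> omega

-- ===== VERDICT (by name: the statement is the Claim_ definition above) =====
theorem extract_markdown_content_spec : Claim_equal_extract_markdown_content := by
  intro content _ _
  show extract_markdown_content content = extract_markdown_content_alt content
  simp only [extract_markdown_content, extract_markdown_content_alt]
  rw [pvScanB_eq _ none none [] (by simp)]
  simp only [Option.none_or, List.length_nil]
  rw [if_neg (by omega : ¬ (0:Nat) = 3)]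
  cases hT : pvFindTitleA (PySem.Chars.splitOn (PySem.Chars.strip content.toList) ['\n']) <;>
    cases hF : pvFindFirstA (PySem.Chars.splitOn (PySem.Chars.strip content.toList) ['\n']) <;>
      simp [Option.or]
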